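-- pv_equiv track=rewrite | github.com/mediacutlet/pwnagotchi_hable | homeassistant/__init__.py | _title_from_value
-- ===== SOURCE A (Python) =====
-- def _title_from_value(val: int | None, table: dict[int, str]) -> str:
--     if not isinstance(val, int):
--         return "Unknown"
--     title = "Unknown"
--     for threshold in sorted(table.keys()):
--         if val >= threshold:
--             title = table[threshold]
--         else:
--             break
--     return title
-- ===== SOURCE B (Python) =====
-- def _title_from_value(val: int | None, table: dict[int, str]) -> str:
--     if not isinstance(val, int):
--         return "Unknown"
--     candidates = [t for t in table if val >= t]
--     if not candidates:
--         return "Unknown"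
--     return table[max(candidates)]
-- ===== Notes on version B (the rewrite author's own statement) =====
-- stated objective: faster
-- what changed: Replaces the sort plus ordered scan-with-break by a single filter of the thresholds <= val and one max lookup.
import Mathlib
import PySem

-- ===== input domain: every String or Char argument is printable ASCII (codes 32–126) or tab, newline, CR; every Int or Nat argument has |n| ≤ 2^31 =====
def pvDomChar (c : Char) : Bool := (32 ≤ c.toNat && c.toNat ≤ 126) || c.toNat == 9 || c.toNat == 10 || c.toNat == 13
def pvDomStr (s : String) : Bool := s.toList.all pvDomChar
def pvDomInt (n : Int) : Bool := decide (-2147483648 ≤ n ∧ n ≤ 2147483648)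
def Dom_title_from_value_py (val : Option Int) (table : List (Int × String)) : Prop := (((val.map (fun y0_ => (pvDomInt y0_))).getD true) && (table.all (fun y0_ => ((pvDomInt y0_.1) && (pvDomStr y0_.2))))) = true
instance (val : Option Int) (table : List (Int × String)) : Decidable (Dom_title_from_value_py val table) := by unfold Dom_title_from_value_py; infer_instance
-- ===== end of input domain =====

-- B replaces A's sort-then-scan-with-break by a filter of the thresholds ≤ val and one max lookup.

-- ===== PORT A =====
-- the 'for threshold in sorted(table.keys()): …' loop with its break and the running 'title'
def goA (v : Int) (d : PySem.Dict Int String) : List Int → String → String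
  | [], title => title
  | k :: rest, title =>
      if v ≥ k then goA v d rest ((d.get? k).getD "Unknown") else title

def title_from_value_py (val : Option Int) (table : List (Int × String)) : String :=
  match val with
  | none => "Unknown"
  | some v =>
      let d := PySem.Dict.ofList table
      goA v d (PySem.List.sorted d.keys (fun x => x) false) "Unknown"

-- ===== PORT B =====
def title_from_value_py_alt (val : Option Int) (table : List (Int × String)) : String :=
  match val with
  | none => "Unknown"
  | some v =>
      let d := PySem.Dict.ofList table
      let candidates := d.keys.filter (fun t => decide (v ≥ t))
      match PySem.List.max? candidates (fun x => x) with
      | none => "Unknown"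
      | some m => (d.get? m).getD "Unknown"

-- ===== PRECONDITION & SPEC =====
def Spec_title_from_value_py (val : Option Int) (table : List (Int × String)) (out : String) : Prop := out = title_from_value_py_alt val table
instance (val : Option Int) (table : List (Int × String)) (out : String) : Decidable (Spec_title_from_value_py val table out) := by unfold Spec_title_from_value_py; infer_instance

-- ===== CLAIM (what is proved, stated in full; the proofs are below) =====
def Claim_equal_title_from_value_py : Prop := ∀ (val : Option Int) (table : List (Int × String)), Dom_title_from_value_py val table → Spec_title_from_value_py val table (title_from_value_py val table)

-- ===== LEMMAS AND PROOFS =====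

-- A's loop over an ascending list returns the lookup of the LAST threshold ≤ v (or the initial title)
lemma goA_eq_getLast (v : Int) (d : PySem.Dict Int String) :
    ∀ (s : List Int), s.Pairwise (· ≤ ·) → ∀ (init : String),
    goA v d s init =
      match (s.filter (fun k => decide (v ≥ k))).getLast? with
      | none => init
      | some m => (d.get? m).getD "Unknown" := by
  intro s
  induction s with
  | nil => intro _ init; simp [goA]
  | cons k rest ih =>
      intro hp init
      have hrest : rest.Pairwise (· ≤ ·) := hp.of_cons
      by_cases hk : v ≥ k
      · have := ih hrest ((d.get? k).getD "Unknown")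
        simp only [goA, if_pos hk, this, List.filter_cons, decide_eq_true hk]
        cases hfr : rest.filter (fun k => decide (v ≥ k)) with
        | nil => simp
        | cons a t =>
            cases hl : (a :: t).getLast? with
            | none => simp [List.getLast?_eq_none_iff] at hl
            | some m => simp [List.getLast?_cons_cons, hl]
      · have hall : ∀ y ∈ rest, k ≤ y := fun y hy => (List.pairwise_cons.mp hp).1 y hy
        have hfr : rest.filter (fun k => decide (v ≥ k)) = [] := by
          apply List.filter_eq_nil_iff.mpr
          intro y hy
          simp only [decide_eq_true_eq, ge_iff_le, not_le]
          exact lt_of_lt_of_le (lt_of_not_ge hk) (hall y hy)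
        simp only [goA, if_neg hk, List.filter_cons, hfr]
        rw [if_neg (by simpa using hk)]
        rfl

-- from Pairwise (≤) : the last element bounds all elements
lemma getLast?_isMax (s : List Int) (hp : s.Pairwise (· ≤ ·)) (m : Int)
    (h : s.getLast? = some m) : ∀ y ∈ s, y ≤ m := by
  induction s with
  | nil => simp at h
  | cons a rest ih =>
      cases hr : rest with
      | nil =>
          subst hr
          simp at h; subst h; simp
      | cons b t =>
          subst hr
          rw [List.getLast?_cons_cons] at h
          intro y hy
          rcases List.mem_cons.mp hy with rfl | hy'
          · have hm : m ∈ b :: t := List.mem_of_getLast? h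
            exact (List.pairwise_cons.mp hp).1 m hm
          · exact ih hp.of_cons h y hy'

theorem title_from_value_py_spec_aux (val : Option Int) (table : List (Int × String)) :
    title_from_value_py val table = title_from_value_py_alt val table := by
  cases val with
  | none => rfl
  | some v =>
      unfold title_from_value_py title_from_value_py_alt
      simp only
      set d := PySem.Dict.ofList table with hd
      set s := PySem.List.sorted d.keys (fun x => x) false with hs
      have hperm : s.Perm d.keys := PySem.List.sorted_perm d.keys (fun x => x) false
      have hpair : s.Pairwise (· ≤ ·) := PySem.List.sorted_pairwise d.keys (fun x => x)
      have hfperm : (s.filter (fun t => decide (v ≥ t))).Perm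
          (d.keys.filter (fun t => decide (v ≥ t))) := hperm.filter _
      rw [goA_eq_getLast v d s hpair "Unknown"]
      cases hlast : (s.filter (fun k => decide (v ≥ k))).getLast? with
      | none =>
          have hse : s.filter (fun k => decide (v ≥ k)) = [] :=
            List.getLast?_eq_none_iff.mp hlast
          have hke : d.keys.filter (fun t => decide (v ≥ t)) = [] := by
            have h2 := hfperm.symm
            rw [hse] at h2
            exact h2.eq_nil
          rw [hke]
          simp [PySem.List.max?]
      | some m =>
          have hm_mem_s : m ∈ s.filter (fun k => decide (v ≥ k)) := List.mem_of_getLast? hlast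
          have hm_mem : m ∈ d.keys.filter (fun t => decide (v ≥ t)) := hfperm.mem_iff.mp hm_mem_s
          have hbound : ∀ y ∈ d.keys.filter (fun t => decide (v ≥ t)), y ≤ m := by
            intro y hy
            have hy' : y ∈ s.filter (fun k => decide (v ≥ k)) := hfperm.mem_iff.mpr hy
            exact getLast?_isMax _ (hpair.filter _) m hlast y hy'
          cases hmax : PySem.List.max? (d.keys.filter (fun t => decide (v ≥ t))) (fun x => x) with
          | none =>
              rw [PySem.List.max?_eq_none_iff] at hmax
              rw [hmax] at hm_mem; simp at hm_mem
          | some m' =>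
              have h1 : m ≤ m' := PySem.List.max?_isMax hmax m hm_mem
              have h2 : m' ≤ m := hbound m' (PySem.List.max?_mem hmax)
              have : m' = m := le_antisymm h2 h1
              rw [this]

-- ===== VERDICT (by name: the statement is the Claim_ definition above) =====
theorem title_from_value_py_spec : Claim_equal_title_from_value_py := by
  intro val table _
  exact title_from_value_py_spec_aux val table
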